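-- pv_equiv track=rewrite | github.com/MichelleZ/leetcode | algorithms/python/restoreTheArray/restoreTheArray.py | numberOfArrays
-- ===== SOURCE A (Python) =====
-- def numberOfArrays(s: str, k: int) -> int:
--     kMod = 10 ** 9 + 7
--     n = len(s)
--     dp = [0] * (n + 1)
--     dp[-1] = 1
--     for i in range(n - 1, -1, -1):
--         if s[i] == '0':
--             continue
--         num = 0
--         for j in range(i + 1, n + 1):
--             num = num * 10 + int(s[j - 1])
--             if num > k: break
--             dp[i] = (dp[i] + dp[j]) % kMod
--     return dp[0]
-- ===== SOURCE B (Python) =====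
-- def numberOfArrays(s: str, k: int) -> int:
--     MOD = 10 ** 9 + 7
--     n = len(s)
--     if k < 1:
--         return 1 if n == 0 else 0
--     # number of decimal digits of k: any longer segment is certainly > k,
--     # any shorter (leading-zero-free) segment is certainly <= k
--     L, t = 0, k
--     while t > 0:
--         t //= 10
--         L += 1
--
--     def segval(i, j):
--         v = 0
--         for p in range(i, j):
--             v = 10 * v + int(s[p])
--         return v
--
--     memo = {}
--
--     def ways(i):
--         if i == n:
--             return 1
--         if s[i] == '0':
--             return 0
--         if i in memo:
--             return memo[i]
--         total = 0
--         for j in range(i + 1, min(i + L, n) + 1):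
--             if j - i < L or segval(i, j) <= k:
--                 total = (total + ways(j)) % MOD
--         memo[i] = total
--         return total
--
--     return ways(0)
-- ===== Notes on version B (the rewrite author's own statement) =====
-- stated objective: alternative
-- what changed: Replaces A's bottom-up in-place suffix table with its accumulate-and-break inner digit scan by top-down memoized recursion (a dict of start positions) whose candidate window is precomputed from the decimal digit length of k: segments shorter than that length are accepted without evaluating them, longer ones are never tried, and only full-length candidates are evaluated.
import Mathlib
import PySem

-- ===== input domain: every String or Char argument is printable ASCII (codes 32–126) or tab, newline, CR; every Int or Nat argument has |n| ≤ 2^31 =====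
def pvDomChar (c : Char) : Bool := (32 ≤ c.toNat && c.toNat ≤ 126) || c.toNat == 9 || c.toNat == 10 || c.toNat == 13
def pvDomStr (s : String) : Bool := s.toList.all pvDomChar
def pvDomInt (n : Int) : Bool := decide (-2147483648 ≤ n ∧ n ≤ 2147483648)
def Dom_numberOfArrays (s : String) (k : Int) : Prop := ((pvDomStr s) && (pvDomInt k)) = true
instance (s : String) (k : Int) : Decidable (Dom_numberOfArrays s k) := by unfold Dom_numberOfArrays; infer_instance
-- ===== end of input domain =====

-- B replaces A's bottom-up in-place suffix table (accumulate-and-break digit scan) by top-down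
-- memoized recursion whose candidate window comes from the precomputed digit length of k
-- (objective: alternative, same asymptotic cost).

-- ===== PORT A =====

-- int(one-character string); the `.getD 0` is reached only outside Pre_ (non-digit ⇒ Python raises)
def pvDigit (c : Char) : Int := (PySem.Int.ofChars? [c]).getD 0

-- inner `for j in range(i+1, n+1)` of A; `acc` is the running dp[i]
def aInner (l : List Char) (k : Int) (dp : List Int) (n : Nat) (num acc : Int) (j : Nat) : Int :=
  if _h : j ≤ n then
    let num' := num * 10 + pvDigit (l.getD (j - 1) ' ')
    if num' > k then acc
    else aInner l k dp n num' ((acc + dp.getD j 0) % 1000000007) (j + 1)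
  else acc
termination_by n + 1 - j

-- outer `for i in range(n-1, -1, -1)` of A; the counter `i+1` means index i is processed next
def aOuter (l : List Char) (k : Int) (n : Nat) : List Int → Nat → List Int
  | dp, 0 => dp
  | dp, i + 1 =>
      aOuter l k n
        (if l.getD i ' ' == '0' then dp else dp.set i (aInner l k dp n 0 0 (i + 1))) i

def numberOfArrays (s : String) (k : Int) : Int :=
  let l := s.toList
  let n := l.length
  let dp := PySem.List.pySetD (List.replicate (n + 1) 0) (-1) 1
  PySem.List.pyGetD (aOuter l k n dp n) 0 0

-- ===== PORT B =====

-- `while t > 0: t //= 10; L += 1` of B (digit length of k)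
def bLen (t : Int) (L : Nat) : Nat :=
  if h : 0 < t then bLen (PySem.Int.floordiv t 10) (L + 1) else L
termination_by t.toNat
decreasing_by
  simp only [PySem.Int.floordiv]
  rw [Int.fdiv_eq_ediv_of_nonneg _ (by norm_num : (0:Int) ≤ 10)]
  omega

-- `segval(i, j)`: `v = 0; for p in range(i, j): v = 10*v + int(s[p])`
def bSegLoop (l : List Char) (j : Nat) (v : Int) (p : Nat) : Int :=
  if _h : p < j then bSegLoop l j (10 * v + pvDigit (l.getD p ' ')) (p + 1) else v
termination_by j - p

mutual
-- `ways(i)` of B, with the memo dict threaded through; fuel only makes the recursion total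
-- (it never runs out on the calls numberOfArrays_alt makes)
def bWays (l : List Char) (k : Int) (L n : Nat) :
    Nat → PySem.Dict Int Int → Nat → Int × PySem.Dict Int Int
  | 0, memo, _ => (0, memo)
  | fuel + 1, memo, i =>
      if i = n then (1, memo)
      else if l.getD i ' ' == '0' then (0, memo)
      else
        match memo.get? (i : Int) with
        | some v => (v, memo)
        | none =>
            let r := bLoop l k L n fuel memo i (i + 1) (min (i + L) n + 1 - (i + 1)) 0
            (r.1, r.2.insert (i : Int) r.1)
termination_by fuel memo i => (fuel, 0)

-- `for j in range(i+1, min(i+L, n)+1)` of B; cnt counts the remaining iterations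
def bLoop (l : List Char) (k : Int) (L n fuel : Nat) (memo : PySem.Dict Int Int)
    (i j cnt : Nat) (total : Int) : Int × PySem.Dict Int Int :=
  match cnt with
  | 0 => (total, memo)
  | cnt' + 1 =>
      if j - i < L ∨ bSegLoop l j 0 i ≤ k then
        let r := bWays l k L n fuel memo j
        bLoop l k L n fuel r.2 i (j + 1) cnt' ((total + r.1) % 1000000007)
      else bLoop l k L n fuel memo i (j + 1) cnt' total
termination_by (fuel, cnt + 1)
end

def numberOfArrays_alt (s : String) (k : Int) : Int :=
  let n := s.toList.length
  if k < 1 then (if n = 0 then 1 else 0)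
  else
    let L := bLen k 0
    (bWays s.toList k L n (n + 1) PySem.Dict.empty 0).1

-- ===== PRECONDITION & SPEC =====
-- A calls int() on every character whose position is reached, so it raises ValueError
-- exactly when some character of s is not an ASCII decimal digit; Pre_ admits digit strings.
def Pre_numberOfArrays (s : String) (k : Int) : Prop := s.toList.all PySem.Chars.isdigit = true
instance (s : String) (k : Int) : Decidable (Pre_numberOfArrays s k) := by
  unfold Pre_numberOfArrays; infer_instance

def pvWitness_numberOfArrays : String × Int := ("2020", 30)

def Spec_numberOfArrays (s : String) (k : Int) (out : Int) : Prop := out = numberOfArrays_alt s k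
instance (s : String) (k : Int) (out : Int) : Decidable (Spec_numberOfArrays s k out) := by
  unfold Spec_numberOfArrays; infer_instance

-- ===== CLAIM (what is proved, stated in full; the proofs are below) =====
def Claim_equal_numberOfArrays : Prop := ∀ (s : String) (k : Int), Dom_numberOfArrays s k → Pre_numberOfArrays s k → Spec_numberOfArrays s k (numberOfArrays s k)

-- ===== LEMMAS AND PROOFS =====

-- value of a digit string, as both implementations evaluate segments
def pvVal (t : List Char) : Int := t.foldl (fun a c => a * 10 + pvDigit c) 0

-- "the segment s[j:i] is usable": nonzero leading digit and value ≤ k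
def pvE (l : List Char) (k : Int) (j i : Nat) : Bool :=
  (l.getD j ' ' != '0') && decide (pvVal ((l.drop j).take (i - j)) ≤ k)

-- pure (un-modded) count of splittings of the suffix starting at i, by first segment
def pvF (l : List Char) (k : Int) (n i : Nat) : Int :=
  if _h : i < n then
    ∑ j ∈ (Finset.Ico (i + 1) (n + 1)).attach, (if pvE l k i j.1 then pvF l k n j.1 else 0)
  else 1
termination_by n - i
decreasing_by
  have := j.2; simp only [Finset.mem_Ico] at this; omega

-- the memo invariant: every stored entry is the (modded) suffix count of its key
def MemoOK (l : List Char) (k : Int) (n : Nat) (memo : PySem.Dict Int Int) : Prop :=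
  ∀ (m : Nat) (v : Int), memo.get? ((m : Nat) : Int) = some v → v = pvF l k n m % 1000000007

theorem pvDigit_nonneg (c : Char) (h : PySem.Chars.isdigit c = true) : 0 ≤ pvDigit c := by
  simp only [PySem.Chars.isdigit, Bool.and_eq_true, decide_eq_true_eq, Char.le_def] at h
  obtain ⟨h1, h2⟩ := h
  have h1' : 48 ≤ c.toNat := h1
  have h2' : c.toNat ≤ 57 := h2
  have hc : Char.ofNat c.toNat = c := Char.ofNat_toNat c
  unfold pvDigit
  rw [← hc]
  interval_cases h : c.toNat <;> decide

theorem pvDigit_le_nine (c : Char) (h : PySem.Chars.isdigit c = true) : pvDigit c ≤ 9 := by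
  simp only [PySem.Chars.isdigit, Bool.and_eq_true, decide_eq_true_eq, Char.le_def] at h
  obtain ⟨h1, h2⟩ := h
  have h1' : 48 ≤ c.toNat := h1
  have h2' : c.toNat ≤ 57 := h2
  have hc : Char.ofNat c.toNat = c := Char.ofNat_toNat c
  unfold pvDigit
  rw [← hc]
  interval_cases h : c.toNat <;> decide

theorem pvDigit_pos (c : Char) (h : PySem.Chars.isdigit c = true) (hz : c ≠ '0') :
    1 ≤ pvDigit c := by
  simp only [PySem.Chars.isdigit, Bool.and_eq_true, decide_eq_true_eq, Char.le_def] at h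
  obtain ⟨h1, h2⟩ := h
  have h1' : 48 ≤ c.toNat := h1
  have h2' : c.toNat ≤ 57 := h2
  have hz' : c.toNat ≠ 48 := by
    intro hcn
    apply hz
    have := Char.ofNat_toNat c
    rw [hcn] at this
    exact this.symm
  have hc : Char.ofNat c.toNat = c := Char.ofNat_toNat c
  unfold pvDigit
  rw [← hc]
  interval_cases h : c.toNat
  · omega
  all_goals decide

theorem pvVal_foldl (t : List Char) : ∀ a : Int,
    t.foldl (fun x c => x * 10 + pvDigit c) a = a * 10 ^ t.length + pvVal t := by
  induction t with
  | nil => intro a; simp [pvVal]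
  | cons c t ih =>
      intro a
      have h1 := ih (a * 10 + pvDigit c)
      have h2 := ih (0 * 10 + pvDigit c)
      simp only [List.foldl_cons, List.length_cons, pvVal] at *
      rw [h1, h2]; ring

theorem pvVal_cons (c : Char) (t : List Char) :
    pvVal (c :: t) = pvDigit c * 10 ^ t.length + pvVal t := by
  have := pvVal_foldl t (0 * 10 + pvDigit c)
  simp only [pvVal, List.foldl_cons] at *
  rw [this]; ring

theorem pvVal_nonneg (t : List Char) (h : ∀ c ∈ t, 0 ≤ pvDigit c) : 0 ≤ pvVal t := by
  induction t with
  | nil => simp [pvVal]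
  | cons c t ih =>
      rw [pvVal_cons]
      have hc : 0 ≤ pvDigit c := h c (List.mem_cons_self ..)
      have ht : 0 ≤ pvVal t := ih (fun c hc => h c (List.mem_cons_of_mem _ hc))
      positivity

theorem pvVal_take_succ (t : List Char) (m : Nat) (hm : m < t.length) :
    pvVal (t.take (m + 1)) = pvVal (t.take m) * 10 + pvDigit (t.getD m ' ') := by
  rw [List.take_add_one, List.getElem?_eq_getElem hm]
  simp only [pvVal, List.foldl_append, Option.toList_some, List.foldl_cons, List.foldl_nil,
    List.getD_eq_getElem?_getD, List.getElem?_eq_getElem hm, Option.getD_some]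

-- extending a segment to the right does not decrease its value
theorem pvVal_take_mono (t : List Char) (h : ∀ c ∈ t, 0 ≤ pvDigit c) {m m' : Nat} (hmm : m ≤ m') :
    pvVal (t.take m) ≤ pvVal (t.take m') := by
  induction m', hmm using Nat.le_induction with
  | base => exact le_refl _
  | succ m' hmm ih =>
      refine le_trans ih ?_
      by_cases hm' : m' < t.length
      · rw [pvVal_take_succ t m' hm']
        have h0 : 0 ≤ pvVal (t.take m') :=
          pvVal_nonneg _ (fun c hc => h c (List.mem_of_mem_take hc))
        have hd : 0 ≤ pvDigit (t.getD m' ' ') := by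
          rw [List.getD_eq_getElem?_getD, List.getElem?_eq_getElem hm', Option.getD_some]
          exact h _ (List.getElem_mem hm')
        linarith
      · rw [List.take_of_length_le (by omega), List.take_of_length_le (by omega)]

-- a digit string of length m has value below 10^m
theorem pvVal_lt_pow (t : List Char) (h : ∀ c ∈ t, PySem.Chars.isdigit c = true) :
    pvVal t < 10 ^ t.length := by
  induction t with
  | nil => simp [pvVal]
  | cons c t ih =>
      rw [pvVal_cons, List.length_cons]
      have hc : pvDigit c ≤ 9 := pvDigit_le_nine c (h c (List.mem_cons_self ..))
      have ht : pvVal t < 10 ^ t.length := ih (fun c hc => h c (List.mem_cons_of_mem _ hc))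
      have hp : (0:Int) ≤ 10 ^ t.length := by positivity
      calc pvDigit c * 10 ^ t.length + pvVal t
        < pvDigit c * 10 ^ t.length + 10 ^ t.length := by linarith
      _ = (pvDigit c + 1) * 10 ^ t.length := by ring
      _ ≤ 10 * 10 ^ t.length := by nlinarith
      _ = 10 ^ (t.length + 1) := by ring

-- a digit string with a nonzero first digit has value at least 10^(length-1)
theorem pvVal_ge_pow (c : Char) (t : List Char)
    (h : ∀ x ∈ (c :: t), PySem.Chars.isdigit x = true) (hz : c ≠ '0') :
    10 ^ t.length ≤ pvVal (c :: t) := by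
  rw [pvVal_cons]
  have hc : 1 ≤ pvDigit c := pvDigit_pos c (h c (List.mem_cons_self ..)) hz
  have ht : 0 ≤ pvVal t :=
    pvVal_nonneg t (fun x hx => pvDigit_nonneg x (h x (List.mem_cons_of_mem _ hx)))
  have hp : (0:Int) ≤ 10 ^ t.length := by positivity
  nlinarith

-- the segment s[i:j] as a cons (i < j ≤ |l|)
theorem seg_cons (l : List Char) (i j : Nat) (hij : i < j) (hjl : j ≤ l.length) :
    (l.drop i).take (j - i) = l.getD i ' ' :: ((l.drop (i + 1)).take (j - (i + 1))) := by
  have hil : i < l.length := by omega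
  rw [List.drop_eq_getElem_cons hil]
  have h1 : j - i = (j - (i + 1)) + 1 := by omega
  rw [h1, List.take_succ_cons]
  congr 1
  rw [List.getD_eq_getElem?_getD, List.getElem?_eq_getElem hil]
  rfl

theorem seg_length (l : List Char) (i j : Nat) (hij : i ≤ j) (hjl : j ≤ l.length) :
    ((l.drop i).take (j - i)).length = j - i := by
  rw [List.length_take, List.length_drop]
  omega

-- ----- bLen characterisation -----

theorem bLen_eq (t : Int) (a : Nat) :
    bLen t a = if 0 < t then bLen (t / 10) (a + 1) else a := by
  rw [bLen]
  simp only [PySem.Int.floordiv, Int.fdiv_eq_ediv_of_nonneg _ (by norm_num : (0:Int) ≤ 10)]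
  rw [dite_eq_ite]

theorem bLen_add (t : Int) : ∀ a : Nat, bLen t a = bLen t 0 + a := by
  suffices H : ∀ (N : Nat) (t : Int), t.toNat ≤ N → ∀ a : Nat, bLen t a = bLen t 0 + a by
    exact H t.toNat t (le_refl _)
  intro N
  induction N with
  | zero =>
      intro t ht a
      have h : ¬ 0 < t := by omega
      rw [bLen_eq t a, if_neg h, bLen_eq t 0, if_neg h]
      omega
  | succ N ih =>
      intro t ht a
      by_cases h : 0 < t
      · have ht' : (t / 10).toNat ≤ N := by omega
        rw [bLen_eq t a, if_pos h, bLen_eq t 0, if_pos h, ih _ ht' (a + 1), ih _ ht' 1]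
        omega
      · rw [bLen_eq t a, if_neg h, bLen_eq t 0, if_neg h]
        omega

theorem bLen_bounds (k : Int) (hk : 0 < k) :
    1 ≤ bLen k 0 ∧ 10 ^ (bLen k 0 - 1) ≤ k ∧ k < 10 ^ (bLen k 0) := by
  suffices H : ∀ (N : Nat) (t : Int), t.toNat ≤ N → 0 < t →
      1 ≤ bLen t 0 ∧ 10 ^ (bLen t 0 - 1) ≤ t ∧ t < 10 ^ (bLen t 0) by
    exact H k.toNat k (le_refl _) hk
  intro N
  induction N with
  | zero => intro t ht h; omega
  | succ N ih =>
      intro t ht h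
      rw [bLen_eq t 0, if_pos h, bLen_add (t / 10) 1]
      by_cases h' : 0 < t / 10
      · have ht' : (t / 10).toNat ≤ N := by omega
        obtain ⟨h1, h2, h3⟩ := ih (t / 10) ht' h'
        set m := bLen (t / 10) 0 with hm
        refine ⟨by omega, ?_, ?_⟩
        · have he : m + 1 - 1 = (m - 1) + 1 := by omega
          rw [he, pow_succ]
          have hdm : t / 10 * 10 ≤ t := by omega
          have := mul_le_mul_of_nonneg_right h2 (by norm_num : (0:Int) ≤ 10)
          linarith
        · rw [pow_succ]
          have h4 : t / 10 + 1 ≤ 10 ^ m := by omega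
          have := mul_le_mul_of_nonneg_right h4 (by norm_num : (0:Int) ≤ 10)
          have hdm : t < (t / 10 + 1) * 10 := by omega
          linarith
      · have h9 : t < 10 := by omega
        have h0 : bLen (t / 10) 0 = 0 := by
          rw [bLen_eq, if_neg h']
        rw [h0]
        norm_num
        omega

-- ----- bSegLoop computes pvVal of the segment -----

theorem bSegLoop_spec (l : List Char) (j : Nat) (hj : j ≤ l.length) (i : Nat) :
    ∀ d p, i ≤ p → p ≤ j → j - p = d →
    bSegLoop l j (pvVal ((l.drop i).take (p - i))) p = pvVal ((l.drop i).take (j - i)) := by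
  intro d
  induction d with
  | zero =>
      intro p h1 h2 h3
      have : p = j := by omega
      subst this
      rw [bSegLoop, dif_neg (by omega)]
  | succ d ih =>
      intro p h1 h2 h3
      have hpj : p < j := by omega
      rw [bSegLoop, dif_pos hpj]
      have hm : p - i < (l.drop i).length := by
        rw [List.length_drop]; omega
      have hget : (l.drop i).getD (p - i) ' ' = l.getD p ' ' := by
        have hidx : i + (p - i) = p := by omega
        rw [List.getD_eq_getElem?_getD, List.getD_eq_getElem?_getD, List.getElem?_drop, hidx]
      have hstep : 10 * pvVal ((l.drop i).take (p - i)) + pvDigit (l.getD p ' ')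
          = pvVal ((l.drop i).take (p + 1 - i)) := by
        have h4 : p + 1 - i = (p - i) + 1 := by omega
        rw [h4, pvVal_take_succ (l.drop i) (p - i) hm, hget]
        ring
      rw [hstep]
      exact ih (p + 1) (by omega) (by omega) (by omega)

theorem bSegLoop_eq_pvVal (l : List Char) (i j : Nat) (hij : i ≤ j) (hj : j ≤ l.length) :
    bSegLoop l j 0 i = pvVal ((l.drop i).take (j - i)) := by
  have h0 : pvVal ((l.drop i).take (i - i)) = 0 := by simp [pvVal]
  have := bSegLoop_spec l j hj i (j - i) i (le_refl i) hij rfl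
  rw [h0] at this
  exact this

-- pvF is zero at a position holding '0'
theorem pvF_zero_of_zero (l : List Char) (k : Int) (n i : Nat) (hi : i < n)
    (hz : l.getD i ' ' = '0') : pvF l k n i = 0 := by
  rw [pvF, dif_pos hi]
  apply Finset.sum_eq_zero
  intro m _
  have hE : pvE l k i m.1 = false := by
    unfold pvE
    rw [hz]
    simp
  simp [hE]

-- pvF expanded without attach
theorem pvF_expand (l : List Char) (k : Int) (n i : Nat) (hi : i < n) :
    pvF l k n i = ∑ j ∈ Finset.Ico (i + 1) (n + 1), (if pvE l k i j then pvF l k n j else 0) := by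
  rw [pvF, dif_pos hi,
    Finset.sum_attach (Finset.Ico (i + 1) (n + 1)) (fun j => if pvE l k i j then pvF l k n j else 0)]

-- ----- A-side loop specs (unchanged from the port of A) -----

theorem aInner_spec (l : List Char) (k : Int) (dp : List Int) (n : Nat) (hn : n = l.length)
    (hd : ∀ c ∈ l, 0 ≤ pvDigit c) (i : Nat) :
    ∀ j accP, i < j → j ≤ n + 1 →
    aInner l k dp n (pvVal ((l.drop i).take (j - 1 - i))) (accP % 1000000007) j
      = (accP + ∑ j' ∈ Finset.Ico j (n + 1),
          (if decide (pvVal ((l.drop i).take (j' - i)) ≤ k) then dp.getD j' 0 else 0)) % 1000000007 := by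
  have hd' : ∀ c ∈ l.drop i, 0 ≤ pvDigit c := fun c hc => hd c (List.mem_of_mem_drop hc)
  suffices H : ∀ fuel j accP, i < j → j ≤ n + 1 → n + 1 - j ≤ fuel →
      aInner l k dp n (pvVal ((l.drop i).take (j - 1 - i))) (accP % 1000000007) j
        = (accP + ∑ j' ∈ Finset.Ico j (n + 1),
            (if decide (pvVal ((l.drop i).take (j' - i)) ≤ k) then dp.getD j' 0 else 0)) % 1000000007 by
    exact fun j accP h1 h2 => H (n + 1) j accP h1 h2 (by omega)
  intro fuel
  induction fuel with
  | zero =>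
      intro j accP h1 h2 h3
      have hj : j = n + 1 := by omega
      subst hj
      rw [aInner, dif_neg (by omega)]
      simp
  | succ fuel ih =>
      intro j accP h1 h2 h3
      by_cases hj : j ≤ n
      · rw [aInner, dif_pos hj]
        have hlen : (l.drop i).length = n - i := by rw [List.length_drop, ← hn]
        have hm : j - 1 - i < (l.drop i).length := by rw [hlen]; omega
        have hget : (l.drop i).getD (j - 1 - i) ' ' = l.getD (j - 1) ' ' := by
          have hidx : i + (j - 1 - i) = j - 1 := by omega
          rw [List.getD_eq_getElem?_getD, List.getD_eq_getElem?_getD, List.getElem?_drop, hidx]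
        have hnum : pvVal ((l.drop i).take (j - 1 - i)) * 10 + pvDigit (l.getD (j - 1) ' ')
            = pvVal ((l.drop i).take (j - i)) := by
          rw [← hget, ← pvVal_take_succ (l.drop i) (j - 1 - i) hm]
          congr 2
          omega
        simp only [hnum]
        by_cases hk : pvVal ((l.drop i).take (j - i)) > k
        · rw [if_pos hk]
          have hzero : (∑ j' ∈ Finset.Ico j (n + 1),
              (if decide (pvVal ((l.drop i).take (j' - i)) ≤ k) then dp.getD j' 0 else 0)) = 0 := by
            apply Finset.sum_eq_zero
            intro j' hj'
            rw [Finset.mem_Ico] at hj'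
            have hle : pvVal ((l.drop i).take (j - i)) ≤ pvVal ((l.drop i).take (j' - i)) :=
              pvVal_take_mono (l.drop i) hd' (by omega)
            have hnk : ¬ (pvVal ((l.drop i).take (j' - i)) ≤ k) := by linarith
            simp [hnk]
          rw [hzero, add_zero]
        · rw [if_neg hk, Int.emod_add_emod]
          have hnum2 : pvVal ((l.drop i).take (j - i)) = pvVal ((l.drop i).take (j + 1 - 1 - i)) := by
            norm_num
          rw [hnum2, ih (j + 1) (accP + dp.getD j 0) (by omega) (by omega) (by omega),
            Finset.sum_eq_sum_Ico_succ_bot (show j < n + 1 by omega)]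
          have hkle : pvVal ((l.drop i).take (j - i)) ≤ k := by linarith
          rw [if_pos (by simpa using hkle)]
          congr 1
          ring
      · have hj' : j = n + 1 := by omega
        subst hj'
        rw [aInner, dif_neg (by omega)]
        simp

theorem getD_set_self (dp : List Int) (i : Nat) (v : Int) (h : i < dp.length) :
    (dp.set i v).getD i 0 = v := by
  simp [List.getD_eq_getElem?_getD, h]

theorem getD_set_ne (dp : List Int) (i j : Nat) (v : Int) (h : i ≠ j) :
    (dp.set i v).getD j 0 = dp.getD j 0 := by
  simp [List.getD_eq_getElem?_getD, h]

theorem aOuter_spec (l : List Char) (k : Int) (n : Nat) (hn : n = l.length)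
    (hd : ∀ c ∈ l, 0 ≤ pvDigit c) :
    ∀ i dp, i ≤ n → dp.length = n + 1 →
    (∀ j', j' < i → dp.getD j' 0 = 0) →
    (∀ j', i ≤ j' → j' ≤ n → dp.getD j' 0 = pvF l k n j' % 1000000007) →
    (aOuter l k n dp i).getD 0 0 = pvF l k n 0 % 1000000007 := by
  intro i
  induction i with
  | zero =>
      intro dp _ _ _ h4
      rw [aOuter]
      exact h4 0 (by omega) (by omega)
  | succ i ih =>
      intro dp hi hlen h3 h4
      rw [aOuter]
      by_cases hz : l.getD i ' ' == '0'
      · rw [if_pos hz]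
        apply ih dp (by omega) hlen
        · intro j' hj'
          exact h3 j' (by omega)
        · intro j' hj1 hj2
          by_cases hji : j' = i
          · subst hji
            have hz' : l.getD j' ' ' = '0' := by simpa using hz
            rw [pvF_zero_of_zero l k n j' (by omega) hz', h3 j' (by omega)]
            simp
          · exact h4 j' (by omega) hj2
      · rw [if_neg hz]
        have hin : i < n := by omega
        have hr : aInner l k dp n 0 0 (i + 1)
            = (∑ j' ∈ Finset.Ico (i + 1) (n + 1),
                (if decide (pvVal ((l.drop i).take (j' - i)) ≤ k) then dp.getD j' 0 else 0))
              % 1000000007 := by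
          have hs := aInner_spec l k dp n hn hd i (i + 1) 0 (by omega) (by omega)
          have h00 : pvVal ((l.drop i).take (i + 1 - 1 - i)) = 0 := by simp [pvVal]
          have h0m : (0:Int) % 1000000007 = 0 := by norm_num
          rw [h00, h0m, zero_add] at hs
          exact hs
        have hFi : pvF l k n i % 1000000007
            = (∑ j' ∈ Finset.Ico (i + 1) (n + 1),
                (if decide (pvVal ((l.drop i).take (j' - i)) ≤ k) then dp.getD j' 0 else 0))
              % 1000000007 := by
          rw [pvF_expand l k n i hin, Finset.sum_int_mod]
          congr 1
          apply Finset.sum_congr rfl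
          intro j' hj'
          rw [Finset.mem_Ico] at hj'
          have hEeq : pvE l k i j' = decide (pvVal ((l.drop i).take (j' - i)) ≤ k) := by
            unfold pvE
            have hb : (l.getD i ' ' != '0') = true := by simpa using hz
            rw [hb, Bool.true_and]
          rw [hEeq]
          split
          · exact (h4 j' (by omega) (by omega)).symm
          · simp
        apply ih (dp.set i (aInner l k dp n 0 0 (i + 1))) (by omega)
          (by rw [List.length_set]; exact hlen)
        · intro j' hj'
          rw [getD_set_ne _ _ _ _ (by omega)]
          exact h3 j' (by omega)
        · intro j' hj1 hj2
          by_cases hji : j' = i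
          · subst hji
            rw [getD_set_self _ _ _ (by omega), hr, hFi]
          · rw [getD_set_ne _ _ _ _ (fun h => hji h.symm)]
            exact h4 j' (by omega) hj2

-- ----- B-side specs -----

-- segment-usability test of bLoop agrees with pvE on the window (leading digit nonzero)
theorem bCond_eq_pvE (l : List Char) (k : Int) (L n : Nat) (hn : n = l.length)
    (hdig : ∀ c ∈ l, PySem.Chars.isdigit c = true)
    (hL1 : 1 ≤ L) (hklo : 10 ^ (L - 1) ≤ k)
    (i j : Nat) (hij : i < j) (hjn : j ≤ n) (hjL : j - i ≤ L)
    (hz : l.getD i ' ' ≠ '0') :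
    (j - i < L ∨ bSegLoop l j 0 i ≤ k) ↔ pvE l k i j = true := by
  have hjl : j ≤ l.length := by omega
  have hseg := bSegLoop_eq_pvVal l i j (by omega) hjl
  have hdseg : ∀ c ∈ (l.drop i).take (j - i), PySem.Chars.isdigit c = true :=
    fun c hc => hdig c (List.mem_of_mem_drop (List.mem_of_mem_take hc))
  constructor
  · intro h
    unfold pvE
    have hb : (l.getD i ' ' != '0') = true := by simpa using hz
    rw [hb, Bool.true_and, decide_eq_true_eq]
    rcases h with h | h
    · -- short segment: value < 10^(j-i) ≤ 10^(L-1) ≤ k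
      have hlt : pvVal ((l.drop i).take (j - i)) < 10 ^ (j - i) := by
        have := pvVal_lt_pow ((l.drop i).take (j - i)) hdseg
        rwa [seg_length l i j (by omega) hjl] at this
      have hple : (10:Int) ^ (j - i) ≤ 10 ^ (L - 1) :=
        pow_le_pow_right₀ (by norm_num) (by omega)
      linarith
    · rwa [hseg] at h
  · intro h
    unfold pvE at h
    rw [Bool.and_eq_true, decide_eq_true_eq] at h
    right
    rw [hseg]
    exact h.2

-- beyond the window the segment value exceeds k, so pvE is false
theorem pvE_false_of_long (l : List Char) (k : Int) (L n : Nat) (hn : n = l.length)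
    (hdig : ∀ c ∈ l, PySem.Chars.isdigit c = true) (hkhi : k < 10 ^ L)
    (i j : Nat) (hij : i < j) (hjn : j ≤ n) (hjL : L < j - i) :
    pvE l k i j = false := by
  unfold pvE
  by_cases hz : l.getD i ' ' = '0'
  · rw [hz]; simp
  · have hjl : j ≤ l.length := by omega
    have hc := seg_cons l i j hij hjl
    have hdseg : ∀ c ∈ (l.drop i).take (j - i), PySem.Chars.isdigit c = true :=
      fun c hc => hdig c (List.mem_of_mem_drop (List.mem_of_mem_take hc))
    rw [hc] at hdseg
    have hge : 10 ^ ((l.drop (i + 1)).take (j - (i + 1))).length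
        ≤ pvVal (l.getD i ' ' :: ((l.drop (i + 1)).take (j - (i + 1)))) :=
      pvVal_ge_pow _ _ hdseg hz
    have hlen : ((l.drop (i + 1)).take (j - (i + 1))).length = j - i - 1 := by
      rw [List.length_take, List.length_drop]
      omega
    rw [hlen] at hge
    have hple : (10:Int) ^ L ≤ 10 ^ (j - i - 1) :=
      pow_le_pow_right₀ (by norm_num) (by omega)
    have hgt : ¬ (pvVal ((l.drop i).take (j - i)) ≤ k) := by
      rw [hc]
      linarith
    simp [hgt]

theorem memoOK_insert (l : List Char) (k : Int) (n : Nat) (memo : PySem.Dict Int Int)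
    (i : Nat) (v : Int) (hm : MemoOK l k n memo) (hv : v = pvF l k n i % 1000000007) :
    MemoOK l k n (memo.insert ((i : Nat) : Int) v) := by
  intro m w hw
  rw [PySem.Dict.get?_insert] at hw
  split at hw
  · rename_i heq
    have hmi : m = i := by exact_mod_cast heq
    subst hmi
    obtain rfl : v = w := Option.some_inj.mp hw
    exact hv
  · exact hm m w hw

-- joint spec of bWays/bLoop, by induction on fuel
theorem bWays_spec (l : List Char) (k : Int) (L n : Nat) (hn : n = l.length)
    (hdig : ∀ c ∈ l, PySem.Chars.isdigit c = true)
    (hL1 : 1 ≤ L) (hklo : 10 ^ (L - 1) ≤ k) (hkhi : k < 10 ^ L) :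
    ∀ fuel i memo, i ≤ n → n + 1 - i ≤ fuel → MemoOK l k n memo →
    (bWays l k L n fuel memo i).1 = pvF l k n i % 1000000007 ∧
      MemoOK l k n (bWays l k L n fuel memo i).2 := by
  intro fuel
  induction fuel with
  | zero => intro i memo hi hf _; omega
  | succ fuel ih =>
      -- spec of bLoop at this fuel, by induction on the remaining count
      have hloop : ∀ i, i < n → l.getD i ' ' ≠ '0' → n - i ≤ fuel →
          ∀ cnt j memo accP, i + 1 ≤ j → j + cnt = min (i + L) n + 1 → MemoOK l k n memo →
          (bLoop l k L n fuel memo i j cnt (accP % 1000000007)).1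
            = (accP + ∑ j' ∈ Finset.Ico j (j + cnt),
                (if pvE l k i j' then pvF l k n j' else 0)) % 1000000007 ∧
            MemoOK l k n (bLoop l k L n fuel memo i j cnt (accP % 1000000007)).2 := by
        intro i hi hz hf cnt
        induction cnt with
        | zero =>
            intro j memo accP h1 h2 hm
            rw [bLoop]
            simp [hm]
        | succ cnt ihc =>
            intro j memo accP h1 h2 hm
            have hjn : j ≤ n := by omega
            have hjL : j - i ≤ L := by omega
            have hij : i < j := by omega
            rw [bLoop]
            by_cases hcond : (j - i < L ∨ bSegLoop l j 0 i ≤ k)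
            · have hE : pvE l k i j = true :=
                (bCond_eq_pvE l k L n hn hdig hL1 hklo i j hij hjn hjL hz).mp hcond
              rw [if_pos hcond]
              obtain ⟨hw1, hw2⟩ := ih j memo (by omega) (by omega) hm
              have hacc : ((accP % 1000000007) + (bWays l k L n fuel memo j).1) % 1000000007
                  = (accP + pvF l k n j) % 1000000007 := by
                rw [hw1]
                conv_rhs => rw [Int.add_emod]
              simp only [hacc]
              obtain ⟨hr1, hr2⟩ := ihc (j + 1) (bWays l k L n fuel memo j).2
                (accP + pvF l k n j) (by omega) (by omega) hw2
              refine ⟨?_, hr2⟩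
              rw [hr1, Finset.sum_eq_sum_Ico_succ_bot (show j < j + (cnt + 1) by omega), hE]
              have harr : j + 1 + cnt = j + (cnt + 1) := by omega
              rw [harr]
              simp only [if_true]
              congr 1
              ring
            · have hE : pvE l k i j = false := by
                by_contra hne
                have : pvE l k i j = true := by
                  cases h : pvE l k i j
                  · exact absurd h hne
                  · rfl
                exact hcond ((bCond_eq_pvE l k L n hn hdig hL1 hklo i j hij hjn hjL hz).mpr this)
              rw [if_neg hcond]
              obtain ⟨hr1, hr2⟩ := ihc (j + 1) memo accP (by omega) (by omega) hm
              refine ⟨?_, hr2⟩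
              rw [hr1, Finset.sum_eq_sum_Ico_succ_bot (show j < j + (cnt + 1) by omega), hE]
              have harr : j + 1 + cnt = j + (cnt + 1) := by omega
              rw [harr]
              simp
      intro i memo hi hf hm
      rw [bWays]
      by_cases hin : i = n
      · rw [if_pos hin]
        refine ⟨?_, hm⟩
        have h1 : pvF l k n n = 1 := by rw [pvF, dif_neg (lt_irrefl n)]
        rw [hin, h1]
        norm_num
      · rw [if_neg hin]
        have hilt : i < n := by omega
        by_cases hz : l.getD i ' ' == '0'
        · rw [if_pos hz]
          have hz' : l.getD i ' ' = '0' := by simpa using hz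
          rw [pvF_zero_of_zero l k n i hilt hz']
          norm_num
          exact hm
        · rw [if_neg hz]
          have hz' : l.getD i ' ' ≠ '0' := by simpa using hz
          cases hget : memo.get? ((i : Nat) : Int) with
          | some v =>
              simp only []
              exact ⟨hm i v hget, hm⟩
          | none =>
              simp only []
              have hmin : i + 1 ≤ min (i + L) n := by omega
              have h0m : (0:Int) = 0 % 1000000007 := by norm_num
              have hcnteq : (i + 1) + (min (i + L) n + 1 - (i + 1)) = min (i + L) n + 1 := by
                omega
              obtain ⟨hr1, hr2⟩ := hloop i hilt hz' (by omega)
                (min (i + L) n + 1 - (i + 1)) (i + 1) memo 0 (by omega) hcnteq hm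
              rw [← h0m] at hr1 hr2
              rw [hcnteq] at hr1
              have hsum : (∑ j' ∈ Finset.Ico (i + 1) (min (i + L) n + 1),
                  (if pvE l k i j' then pvF l k n j' else 0)) = pvF l k n i := by
                rw [pvF_expand l k n i hilt]
                apply Finset.sum_subset
                · apply Finset.Ico_subset_Ico (le_refl _)
                  omega
                · intro j' hj1 hj2
                  rw [Finset.mem_Ico] at hj1
                  rw [Finset.mem_Ico, not_and_or] at hj2
                  have hjL : min (i + L) n + 1 ≤ j' := by omega
                  have hlong : L < j' - i := by omega
                  rw [pvE_false_of_long l k L n hn hdig hkhi i j' (by omega) (by omega) hlong]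
                  simp
              rw [hsum, zero_add] at hr1
              exact ⟨hr1, memoOK_insert l k n _ i _ hr2 hr1⟩

-- pvF when k < 1: only the empty string splits
theorem pvF_of_k_lt_one (l : List Char) (k : Int) (n : Nat) (hn : n = l.length)
    (hdig : ∀ c ∈ l, PySem.Chars.isdigit c = true) (hk : k < 1) (i : Nat) (hi : i < n) :
    pvF l k n i = 0 := by
  rw [pvF, dif_pos hi]
  apply Finset.sum_eq_zero
  intro j _
  have hj := j.2
  rw [Finset.mem_Ico] at hj
  unfold pvE
  by_cases hz : l.getD i ' ' = '0'
  · rw [hz]; simp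
  · have hjl : j.1 ≤ l.length := by omega
    have hc := seg_cons l i j.1 (by omega) hjl
    have hdseg : ∀ c ∈ (l.drop i).take (j.1 - i), PySem.Chars.isdigit c = true :=
      fun c hc => hdig c (List.mem_of_mem_drop (List.mem_of_mem_take hc))
    rw [hc] at hdseg
    have hge : 10 ^ ((l.drop (i + 1)).take (j.1 - (i + 1))).length
        ≤ pvVal (l.getD i ' ' :: ((l.drop (i + 1)).take (j.1 - (i + 1)))) :=
      pvVal_ge_pow _ _ hdseg hz
    have hp : (1:Int) ≤ 10 ^ ((l.drop (i + 1)).take (j.1 - (i + 1))).length :=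
      one_le_pow₀ (by norm_num)
    have hgt : ¬ (pvVal ((l.drop i).take (j.1 - i)) ≤ k) := by
      rw [hc]
      linarith
    simp [hgt]

-- ===== VERDICT (by name: the statement is the Claim_ definition above) =====
theorem numberOfArrays_spec : Claim_equal_numberOfArrays := by
  intro s k _hdom hpre
  unfold Spec_numberOfArrays
  unfold Pre_numberOfArrays at hpre
  rw [List.all_eq_true] at hpre
  have hdig : ∀ c ∈ s.toList, PySem.Chars.isdigit c = true := fun c hc => hpre c hc
  have hd : ∀ c ∈ s.toList, 0 ≤ pvDigit c := fun c hc => pvDigit_nonneg c (hpre c hc)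
  set l := s.toList with hl
  set n := l.length with hn'
  have hA : numberOfArrays s k = pvF l k n 0 % 1000000007 := by
    have hdef : numberOfArrays s k
        = PySem.List.pyGetD
            (aOuter l k n (PySem.List.pySetD (List.replicate (n + 1) 0) (-1) 1) n) 0 0 := rfl
    have hsetd : PySem.List.pySetD (List.replicate (n + 1) (0:Int)) (-1) 1
        = (List.replicate (n + 1) (0:Int)).set n 1 := by
      simp [PySem.List.pySetD, PySem.List.pySet?, PySem.List.pyIdx?]
    have hget0 : ∀ xs : List Int, PySem.List.pyGetD xs 0 0 = xs.getD 0 0 := fun xs => by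
      simpa using PySem.List.pyGetD_natCast xs 0 0
    rw [hdef, hsetd, hget0]
    apply aOuter_spec l k n hn' hd n _ (le_refl n) (by simp)
    · intro j' hj'
      rw [getD_set_ne _ _ _ _ (by omega)]
      have hle : j' ≤ n := by omega
      simp [List.getD_eq_getElem?_getD, hle]
    · intro j' h1 h2
      have hj : j' = n := by omega
      subst hj
      rw [getD_set_self _ _ _ (by simp)]
      rw [pvF, dif_neg (lt_irrefl n)]
      norm_num
  have hB : numberOfArrays_alt s k = pvF l k n 0 % 1000000007 := by
    by_cases hk : k < 1
    · have hdef : numberOfArrays_alt s k = (if n = 0 then 1 else 0 : Int) := by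
        simp only [numberOfArrays_alt, ← hl, ← hn', if_pos hk]
      rw [hdef]
      by_cases hn0 : n = 0
      · rw [if_pos hn0, pvF, dif_neg (by omega)]
        norm_num
      · rw [if_neg hn0, pvF_of_k_lt_one l k n hn' hdig hk 0 (by omega)]
        norm_num
    · have hkpos : 0 < k := by omega
      obtain ⟨hL1, hklo, hkhi⟩ := bLen_bounds k hkpos
      have hdef : numberOfArrays_alt s k
          = (bWays l k (bLen k 0) n (n + 1) PySem.Dict.empty 0).1 := by
        simp only [numberOfArrays_alt, ← hl, ← hn', if_neg hk]
      rw [hdef]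
      have hme : MemoOK l k n PySem.Dict.empty := by
        intro m v hv
        rw [PySem.Dict.get?_empty] at hv
        exact absurd hv (by simp)
      exact (bWays_spec l k (bLen k 0) n hn' hdig hL1 hklo hkhi (n + 1) 0
        PySem.Dict.empty (by omega) (by omega) hme).1
  rw [hA, hB]
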